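-- pv_equiv track=rewrite | github.com/mvrcii/vesuvius_first_title_prize | src/phoenix/utility/data_validation.py | find_consecutive_ch_blocks_of_size
-- ===== SOURCE A (Python) =====
-- def find_consecutive_ch_blocks_of_size(channels, ch_block_size):
--     channels = sorted(channels)
--     result = []
--     i = 0
--     while i <= len(channels) - ch_block_size:
--         if all(channels[i + j] + 1 == channels[i + j + 1] for j in range(ch_block_size - 1)):
--             result.extend(channels[i:i + ch_block_size])
--             i += ch_block_size  # Skip to the element after the current block
--         else:
--             i += 1
--     return set(result)
-- ===== SOURCE B (Python) =====
-- def find_consecutive_ch_blocks_of_size(channels, ch_block_size):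
--     out = []
--     run = []
--     for x in sorted(channels):
--         if run and x != run[-1] + 1:
--             out += run[: len(run) // ch_block_size * ch_block_size]
--             run = []
--         run.append(x)
--     out += run[: len(run) // ch_block_size * ch_block_size]
--     return set(out)
-- ===== Notes on version B (the rewrite author's own statement) =====
-- stated objective: alternative
-- what changed: A rescans a k-wide window with an inner all() at every index and re-slices each found block; B makes one pass over the sorted list, accumulating each maximal consecutive run once and emitting its largest multiple-of-k prefix, so the inner window scan disappears.
import Mathlib
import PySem

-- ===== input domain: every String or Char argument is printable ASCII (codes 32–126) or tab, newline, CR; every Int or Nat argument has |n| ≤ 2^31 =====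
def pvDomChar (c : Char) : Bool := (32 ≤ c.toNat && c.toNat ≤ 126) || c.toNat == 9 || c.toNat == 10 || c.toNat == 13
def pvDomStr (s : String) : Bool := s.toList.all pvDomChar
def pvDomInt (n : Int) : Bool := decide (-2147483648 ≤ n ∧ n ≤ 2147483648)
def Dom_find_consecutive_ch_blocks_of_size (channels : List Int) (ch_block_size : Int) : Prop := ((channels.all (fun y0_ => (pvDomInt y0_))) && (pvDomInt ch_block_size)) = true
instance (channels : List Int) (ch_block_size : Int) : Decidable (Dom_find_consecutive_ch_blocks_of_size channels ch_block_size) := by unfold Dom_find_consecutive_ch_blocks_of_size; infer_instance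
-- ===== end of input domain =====

-- B replaces A's index-scan with inner all()-rechecks by a single pass that accumulates each
-- maximal consecutive run once and keeps its largest multiple-of-k prefix (alternative algorithm).
-- A mutates nothing observable (it rebinds `channels` locally); the equivalence is about the return value.

-- ===== PORT A =====
-- the all(...) generator: all(channels[i+j] + 1 == channels[i+j+1] for j in range(ch_block_size - 1))
def pvChainA (s : List Int) (i : Nat) (k : Int) : Bool :=
  (PySem.List.pyRange 0 (k - 1) 1).all (fun j =>
    (PySem.List.pyGet? s ((i : Int) + j)).map (· + 1) == PySem.List.pyGet? s ((i : Int) + j + 1))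

-- the while loop; fuel only makes it total (with 1 ≤ k, s.length + 1 fuel is never exhausted;
-- for k ≤ 0 the Python loop diverges, excluded by Pre_)
def pvLoopA (s : List Int) (k : Int) : Nat → Nat → List Int → List Int
  | 0, _, res => res
  | fuel+1, i, res =>
    if (i : Int) ≤ (s.length : Int) - k then
      if pvChainA s i k then
        pvLoopA s k fuel (i + k.toNat) (res ++ PySem.List.slice s (some (i : Int)) (some ((i : Int) + k)))
      else
        pvLoopA s k fuel (i + 1) res
    else res

def find_consecutive_ch_blocks_of_size (channels : List Int) (ch_block_size : Int) : List Int :=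
  let s := PySem.List.sorted channels (fun x => x) false
  PySem.Set.ofList (pvLoopA s ch_block_size (s.length + 1) 0 [])

-- ===== PORT B =====
-- run[: len(run) // ch_block_size * ch_block_size]
def pvEmitB (run : List Int) (k : Int) : List Int :=
  PySem.List.slice run none (some (PySem.Int.floordiv (run.length : Int) k * k))

-- one step of the for loop, state = (out, run)
def pvStepB (k : Int) (st : List Int × List Int) (x : Int) : List Int × List Int :=
  if st.2 ≠ [] ∧ (PySem.List.pyGet? st.2 (-1)).map (· + 1) ≠ some x then
    (st.1 ++ pvEmitB st.2 k, [x])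
  else
    (st.1, st.2 ++ [x])

def find_consecutive_ch_blocks_of_size_alt (channels : List Int) (ch_block_size : Int) : List Int :=
  let s := PySem.List.sorted channels (fun x => x) false
  let st := s.foldl (pvStepB ch_block_size) ([], [])
  PySem.Set.ofList (st.1 ++ pvEmitB st.2 ch_block_size)

-- ===== PRECONDITION & SPEC =====
-- Pre_ excludes only ch_block_size ≤ 0, where the Python A never returns (the while loop's index
-- no longer advances past len(channels) - ch_block_size, so A diverges).
def Pre_find_consecutive_ch_blocks_of_size (channels : List Int) (ch_block_size : Int) : Prop :=
  1 ≤ ch_block_size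
instance (channels : List Int) (ch_block_size : Int) : Decidable (Pre_find_consecutive_ch_blocks_of_size channels ch_block_size) := by unfold Pre_find_consecutive_ch_blocks_of_size; infer_instance

def pvWitness_find_consecutive_ch_blocks_of_size : List Int × Int := ([3, 1, 2, 7, 8, 5], 2)

def Spec_find_consecutive_ch_blocks_of_size (channels : List Int) (ch_block_size : Int) (out : List Int) : Prop := out = find_consecutive_ch_blocks_of_size_alt channels ch_block_size
instance (channels : List Int) (ch_block_size : Int) (out : List Int) : Decidable (Spec_find_consecutive_ch_blocks_of_size channels ch_block_size out) := by unfold Spec_find_consecutive_ch_blocks_of_size; infer_instance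

-- ===== CLAIM (what is proved, stated in full; the proofs are below) =====
def Claim_equal_find_consecutive_ch_blocks_of_size : Prop := ∀ (channels : List Int) (ch_block_size : Int), Dom_find_consecutive_ch_blocks_of_size channels ch_block_size → Pre_find_consecutive_ch_blocks_of_size channels ch_block_size → Spec_find_consecutive_ch_blocks_of_size channels ch_block_size (find_consecutive_ch_blocks_of_size channels ch_block_size)

-- ===== LEMMAS AND PROOFS =====

-- `l` is a chain of consecutive integers
def pvIsChain : List Int → Bool
  | a :: b :: t => (b == a + 1) && pvIsChain (b :: t)
  | _ => true

-- split off the longest +1-continuation of `p` from the front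
def pvSplit (p : Int) : List Int → List Int × List Int
  | [] => ([], [])
  | x :: xs => if x = p + 1 then (x :: (pvSplit x xs).1, (pvSplit x xs).2) else ([], x :: xs)

lemma pvSplit_snd_length (p : Int) (l : List Int) : (pvSplit p l).2.length ≤ l.length := by
  induction l generalizing p with
  | nil => simp [pvSplit]
  | cons x xs ih =>
    simp only [pvSplit]
    split
    · exact le_trans (ih x) (by simp)
    · simp

-- keep the largest multiple-of-kn prefix
def pvEmit (kn : Nat) (l : List Int) : List Int := l.take (l.length / kn * kn)

-- canonical form: per maximal run, its largest multiple-of-kn prefix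
def pvCanon (kn : Nat) : List Int → List Int
  | [] => []
  | x :: xs =>
    pvEmit kn (x :: (pvSplit x xs).1) ++ pvCanon kn (pvSplit x xs).2
  termination_by l => l.length
  decreasing_by
    have := pvSplit_snd_length x xs
    simp; omega

-- A's greedy scan, expressed on the suffix it still looks at
def pvG (kn : Nat) : List Int → List Int
  | [] => []
  | x :: xs =>
    if kn ≤ xs.length + 1 ∧ 1 ≤ kn then
      if pvIsChain ((x :: xs).take kn) then
        (x :: xs).take kn ++ pvG kn ((x :: xs).drop kn)
      else pvG kn xs
    else []
  termination_by l => l.length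
  decreasing_by
    · simp; omega
    · simp

lemma pvG_short (kn : Nat) (t : List Int) (h : t.length < kn) : pvG kn t = [] := by
  cases t with
  | nil => simp [pvG]
  | cons x xs => rw [pvG]; rw [if_neg]; simp at h; omega

-- chain facts
lemma chain_cons (a : Int) (l : List Int) (h : pvIsChain (a :: l) = true) : pvIsChain l = true := by
  cases l with
  | nil => simp [pvIsChain]
  | cons b t => rw [pvIsChain] at h; exact (Bool.and_eq_true_iff.mp h).2

lemma chain_take (l : List Int) (n : Nat) (h : pvIsChain l = true) : pvIsChain (l.take n) = true := by
  induction l generalizing n with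
  | nil => simp [pvIsChain]
  | cons a t ih =>
    cases n with
    | zero => simp [pvIsChain]
    | succ m =>
      cases t with
      | nil => simpa using h
      | cons b u =>
        cases m with
        | zero => simp [pvIsChain]
        | succ m' =>
          rw [pvIsChain] at h
          have h2 := (Bool.and_eq_true_iff.mp h).2
          have h1 := (Bool.and_eq_true_iff.mp h).1
          have := ih (m' + 1) h2
          simp only [List.take_succ_cons] at *
          rw [pvIsChain]
          exact Bool.and_eq_true_iff.mpr ⟨h1, this⟩

lemma chain_drop (l : List Int) (n : Nat) (h : pvIsChain l = true) : pvIsChain (l.drop n) = true := by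
  induction n generalizing l with
  | zero => simpa
  | succ m ih =>
    cases l with
    | nil => simp [pvIsChain]
    | cons a t =>
      simp only [List.drop_succ_cons]
      exact ih t (chain_cons a t h)

lemma chain_boundary (l : List Int) (y : Int) (t : List Int) (h : pvIsChain (l ++ y :: t) = true)
    (hl : l ≠ []) : l.getLast? = some (y - 1) := by
  induction l with
  | nil => simp at hl
  | cons a u ih =>
    cases u with
    | nil =>
      simp only [List.nil_append, List.cons_append, pvIsChain] at h
      have := (Bool.and_eq_true_iff.mp h).1
      simp at this ⊢
      omega
    | cons b v =>
      have : pvIsChain ((b :: v) ++ y :: t) = true := chain_cons a _ (by simpa using h)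
      have hr := ih this (by simp)
      simpa using hr

-- pvSplit facts
lemma pvSplit_append (p : Int) (l : List Int) : (pvSplit p l).1 ++ (pvSplit p l).2 = l := by
  induction l generalizing p with
  | nil => simp [pvSplit]
  | cons x xs ih =>
    simp only [pvSplit]
    split
    · simpa using ih x
    · simp

lemma pvSplit_chain (p : Int) (l : List Int) : pvIsChain (p :: (pvSplit p l).1) = true := by
  induction l generalizing p with
  | nil => simp [pvSplit, pvIsChain]
  | cons x xs ih =>
    simp only [pvSplit]
    split
    · rename_i hx
      rw [pvIsChain]
      exact Bool.and_eq_true_iff.mpr ⟨by simp [hx], ih x⟩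
    · simp [pvIsChain]

lemma pvSplit_boundary (p : Int) (l : List Int) (y : Int) (t : List Int)
    (h : (pvSplit p l).2 = y :: t) : (p :: (pvSplit p l).1).getLast? ≠ some (y - 1) := by
  induction l generalizing p with
  | nil => simp [pvSplit] at h
  | cons x xs ih =>
    simp only [pvSplit] at h ⊢
    split at h
    · rename_i hx
      split
      · have := ih x h
        simpa using this
      · simp_all
    · rename_i hx
      split
      · simp_all
      · have hxy : x = y := by injection h
        simp only [List.getLast?_singleton]
        intro hc
        apply hx
        have : p = y - 1 := by injection hc
        omega

-- boundary predicate between a run and the rest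
def pvBnd (run rest : List Int) : Prop :=
  ∀ y t, rest = y :: t → run.getLast? ≠ some (y - 1)

-- ==== L3a: A's greedy on (run ++ rest) emits pvEmit run and recurses on rest ====
lemma pvG_run (kn : Nat) (hkn : 1 ≤ kn) (run rest : List Int)
    (hc : pvIsChain run = true) (hb : pvBnd run rest) :
    pvG kn (run ++ rest) = pvEmit kn run ++ pvG kn rest := by
  have H : ∀ n run rest, run.length = n → pvIsChain run = true → pvBnd run rest →
      pvG kn (run ++ rest) = pvEmit kn run ++ pvG kn rest := by
    intro n
    induction n using Nat.strong_induction_on with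
    | _ n ih =>
      intro run rest hn hc hb
      match run, hn with
      | [], hn =>
        simp [pvEmit]
      | x :: xs, hn =>
        set run := x :: xs with hrun
        have hL : run.length = xs.length + 1 := by simp [hrun]
        by_cases hkL : kn ≤ run.length
        · -- a whole block fits inside the run
          have htk : (run ++ rest).take kn = run.take kn := by
            rw [List.take_append]
            have : kn - run.length = 0 := by omega
            simp [this]
          have hdk : (run ++ rest).drop kn = run.drop kn ++ rest := by
            rw [List.drop_append]
            have : kn - run.length = 0 := by omega
            simp [this]
          have hcond : kn ≤ (xs ++ rest).length + 1 ∧ 1 ≤ kn := by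
            constructor
            · simp only [List.length_append]; omega
            · exact hkn
          have hchain : pvIsChain ((x :: (xs ++ rest)).take kn) = true := by
            have : (x :: (xs ++ rest)) = run ++ rest := by simp [hrun]
            rw [this, htk]
            exact chain_take run kn hc
          have step : pvG kn (run ++ rest) = run.take kn ++ pvG kn (run.drop kn ++ rest) := by
            rw [hrun]
            show pvG kn (x :: (xs ++ rest)) = _
            rw [pvG, if_pos hcond, if_pos hchain]
            have h1 : (x :: (xs ++ rest)) = run ++ rest := by simp [hrun]
            rw [h1, htk, hdk]
          rw [step]
          have ihres := ih (run.drop kn).length (by simp; omega) (run.drop kn) rest rfl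
            (chain_drop run kn hc)
            (by
              intro y t hre
              by_cases hdn : run.drop kn = []
              · simp [hdn]
              · have : (run.drop kn).getLast? = run.getLast? := by
                  conv_rhs => rw [← List.take_append_drop kn run]
                  rw [List.getLast?_append_of_ne_nil _ hdn]
                rw [this]
                exact hb y t hre)
          rw [ihres, ← List.append_assoc]
          congr 1
          -- pvEmit kn run = run.take kn ++ pvEmit kn (run.drop kn)
          have hdiv : run.length / kn = (run.length - kn) / kn + 1 :=
            Nat.div_eq_sub_div (by omega) hkL
          have hlen : (run.drop kn).length = run.length - kn := by simp
          simp only [pvEmit, hdiv, hlen, Nat.add_mul, one_mul, Nat.add_comm]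
          rw [List.take_add]
        · -- run shorter than a block: the whole run is skipped
          push Not at hkL
          have hemit : pvEmit kn run = [] := by
            simp [pvEmit, Nat.div_eq_of_lt hkL]
          rw [hemit, List.nil_append]
          by_cases hT : (run ++ rest).length < kn
          · rw [pvG_short kn _ hT, pvG_short kn rest (by simp at hT; omega)]
          · push Not at hT
            -- rest is nonempty
            obtain ⟨y, t, hre⟩ : ∃ y t, rest = y :: t := by
              cases rest with
              | nil => exfalso; simp at hT; omega
              | cons y t => exact ⟨y, t, rfl⟩
            have hchain : pvIsChain ((x :: (xs ++ rest)).take kn) = true → False := by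
              intro hch
              have h1 : (x :: (xs ++ rest)).take kn = run ++ (y :: t).take (kn - run.length) := by
                have : (x :: (xs ++ rest)) = run ++ rest := by simp [hrun]
                rw [this, List.take_append, List.take_of_length_le (by omega), hre]
              have h2 : (y :: t).take (kn - run.length) = y :: t.take (kn - run.length - 1) := by
                have : kn - run.length = (kn - run.length - 1) + 1 := by
                  simp at hT; omega
                rw [this, List.take_succ_cons]
                simp
              rw [h1, h2] at hch
              exact hb y t hre (chain_boundary run y _ hch (by simp [hrun]))
            have step : pvG kn (run ++ rest) = pvG kn (xs ++ rest) := by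
              rw [hrun]
              show pvG kn (x :: (xs ++ rest)) = _
              rw [pvG, if_pos (by
                    refine ⟨?_, hkn⟩
                    have := hT
                    simp only [hrun, List.cons_append, List.length_cons, List.length_append] at this ⊢
                    omega),
                 if_neg (by intro hch; exact hchain hch)]
            rw [step]
            have ihres := ih xs.length (by omega) xs rest rfl (chain_cons x xs hc)
              (by
                intro y' t' hre'
                cases hxs : xs with
                | nil => simp
                | cons a u =>
                  have : xs.getLast? = run.getLast? := by
                    rw [hrun]
                    have : (x :: xs) = [x] ++ xs := rfl
                    rw [this, List.getLast?_append_of_ne_nil _ (by simp [hxs])]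
                  rw [← hxs, this]
                  exact hb y' t' hre')
            rw [ihres]
            have : pvEmit kn xs = [] := by
              simp [pvEmit, Nat.div_eq_of_lt (by omega : xs.length < kn)]
            simp [this]
  exact H run.length run rest rfl hc hb

-- ==== pvG equals the canonical per-run form ====
lemma pvG_eq_canon (kn : Nat) (hkn : 1 ≤ kn) (t : List Int) : pvG kn t = pvCanon kn t := by
  have H : ∀ n t, t.length = n → pvG kn t = pvCanon kn t := by
    intro n
    induction n using Nat.strong_induction_on with
    | _ n ih =>
      intro t hn
      match t, hn with
      | [], _ => simp [pvG, pvCanon]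
      | x :: xs, hn =>
        rw [pvCanon]
        have hsp := pvSplit_append x xs
        have hx : x :: xs = (x :: (pvSplit x xs).1) ++ (pvSplit x xs).2 := by
          simp [hsp]
        conv_lhs => rw [hx]
        rw [pvG_run kn hkn _ _ (pvSplit_chain x xs)
              (fun y t h => pvSplit_boundary x xs y t h)]
        congr 1
        exact ih (pvSplit x xs).2.length
          (by have := pvSplit_snd_length x xs; simp at hn; omega) _ rfl
  exact H t.length t rfl

-- ==== the all(...) generator check is the chain test on the window ====
lemma chainA_window (s : List Int) : ∀ (n i : Nat), i + n < s.length →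
    ((List.range n).all (fun m =>
      (PySem.List.pyGet? s ((i : Int) + (m : Nat))).map (· + 1) ==
        PySem.List.pyGet? s ((i : Int) + (m : Nat) + 1)))
    = pvIsChain ((s.drop i).take (n + 1)) := by
  intro n
  induction n with
  | zero =>
    intro i hi
    rw [List.drop_eq_getElem_cons (by omega : i < s.length)]
    simp only [List.take_succ_cons, List.take_zero]
    rfl
  | succ n ihn =>
    intro i hi
    have hii : i < s.length := by omega
    have hii1 : i + 1 < s.length := by omega
    rw [List.range_succ_eq_map, List.all_cons, List.all_map]
    have hhead : ((PySem.List.pyGet? s ((i : Int) + ((0 : Nat) : Int))).map (· + 1) ==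
        PySem.List.pyGet? s ((i : Int) + ((0 : Nat) : Int) + 1))
        = (s[i + 1] == s[i] + 1) := by
      rw [show (i : Int) + ((0 : Nat) : Int) = ((i : Nat) : Int) by push_cast; ring]
      rw [show ((i : Nat) : Int) + 1 = (((i + 1 : Nat)) : Int) by push_cast; ring]
      rw [PySem.List.pyGet?_natCast, PySem.List.pyGet?_natCast,
        List.getElem?_eq_getElem hii, List.getElem?_eq_getElem hii1]
      simp [eq_comm]
    rw [hhead]
    have htail : ∀ m : Nat,
        ((PySem.List.pyGet? s ((i : Int) + ((Nat.succ m : Nat) : Int))).map (· + 1) ==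
          PySem.List.pyGet? s ((i : Int) + ((Nat.succ m : Nat) : Int) + 1))
        = ((PySem.List.pyGet? s (((i + 1 : Nat) : Int) + ((m : Nat) : Int))).map (· + 1) ==
          PySem.List.pyGet? s (((i + 1 : Nat) : Int) + ((m : Nat) : Int) + 1)) := by
      intro m
      rw [show (i : Int) + ((Nat.succ m : Nat) : Int) = ((i + 1 : Nat) : Int) + ((m : Nat) : Int) by
        push_cast; ring]
    simp only [Function.comp_def]
    rw [List.all_congr rfl htail, ihn (i + 1) (by omega)]
    rw [List.drop_eq_getElem_cons hii, List.take_succ_cons,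
        List.drop_eq_getElem_cons hii1, List.take_succ_cons, pvIsChain]

-- pvG unfolded on a long-enough suffix
lemma pvG_step_true (kn : Nat) (t : List Int) (h1 : kn ≤ t.length) (h2 : 1 ≤ kn)
    (hch : pvIsChain (t.take kn) = true) : pvG kn t = t.take kn ++ pvG kn (t.drop kn) := by
  cases t with
  | nil => simp at h1; omega
  | cons x xs => rw [pvG, if_pos ⟨by simp at h1 ⊢; omega, h2⟩, if_pos hch]

lemma pvG_step_false (kn : Nat) (t : List Int) (h1 : kn ≤ t.length) (h2 : 1 ≤ kn)
    (hch : pvIsChain (t.take kn) = false) : pvG kn t = pvG kn t.tail := by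
  cases t with
  | nil => simp at h1; omega
  | cons x xs =>
    rw [pvG, if_pos ⟨by simp at h1 ⊢; omega, h2⟩, if_neg (by simp [hch]), List.tail_cons]

-- ==== A's while loop computes pvG on the unscanned suffix ====
lemma loopA_eq (s : List Int) (k : Int) (hk : 1 ≤ k) :
    ∀ (fuel i : Nat) (res : List Int), s.length + 1 ≤ fuel + i →
    pvLoopA s k fuel i res = res ++ pvG k.toNat (s.drop i) := by
  have hkc : ((k.toNat : Nat) : Int) = k := by omega
  have hk1 : 1 ≤ k.toNat := by omega
  intro fuel
  induction fuel with
  | zero =>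
    intro i res hf
    rw [pvLoopA, List.drop_eq_nil_of_le (by omega), pvG]
    simp
  | succ fuel ih =>
    intro i res hf
    rw [pvLoopA]
    by_cases hcond : (i : Int) ≤ (s.length : Int) - k
    · have hikn : i + k.toNat ≤ s.length := by omega
      have hlen : k.toNat ≤ (s.drop i).length := by simp; omega
      have hbridge : pvChainA s i k = pvIsChain ((s.drop i).take k.toNat) := by
        unfold pvChainA
        rw [PySem.List.pyRange_one, List.all_map]
        have hn : (k - 1 - 0).toNat = (k.toNat - 1 : Nat) := by omega
        rw [hn]
        have hfun : ∀ m : Nat, ((PySem.List.pyGet? s ((i : Int) + ((0 : Int) + (m : Nat)))).map (· + 1) ==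
            PySem.List.pyGet? s ((i : Int) + ((0 : Int) + (m : Nat)) + 1))
            = ((PySem.List.pyGet? s ((i : Int) + ((m : Nat) : Int))).map (· + 1) ==
            PySem.List.pyGet? s ((i : Int) + ((m : Nat) : Int) + 1)) := by
          intro m
          rw [show (0 : Int) + ((m : Nat) : Int) = ((m : Nat) : Int) by ring]
        simp only [Function.comp_def]
        rw [List.all_congr rfl hfun]
        rw [chainA_window s (k.toNat - 1) i (by omega)]
        have : k.toNat - 1 + 1 = k.toNat := by omega
        rw [this]
      rw [if_pos hcond]
      by_cases hch : pvChainA s i k = true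
      · rw [if_pos hch]
        have hslice : PySem.List.slice s (some (i : Int)) (some ((i : Int) + k)) =
            (s.drop i).take k.toNat := by
          rw [show (i : Int) + k = (i : Int) + ((k.toNat : Nat) : Int) by rw [hkc]]
          rw [PySem.List.slice_natCast_add]
        rw [ih (i + k.toNat) _ (by omega), hslice]
        rw [pvG_step_true k.toNat (s.drop i) hlen hk1 (by rw [← hbridge]; exact hch)]
        rw [List.drop_drop, List.append_assoc]
      · rw [if_neg hch]
        rw [ih (i + 1) res (by omega)]
        rw [pvG_step_false k.toNat (s.drop i) hlen hk1
              (by rw [← hbridge]; exact Bool.eq_false_iff.mpr hch)]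
        rw [List.tail_drop]
    · rw [if_neg hcond]
      have : (s.drop i).length < k.toNat := by simp; omega
      rw [pvG_short k.toNat _ this]
      simp

-- ==== the Python slice run[: len(run)//k * k] is pvEmit ====
lemma emitB_eq (run : List Int) (k : Int) (hk : 1 ≤ k) : pvEmitB run k = pvEmit k.toNat run := by
  obtain ⟨kn, rfl⟩ : ∃ kn : Nat, k = (kn : Int) := ⟨k.toNat, by omega⟩
  unfold pvEmitB pvEmit
  rw [PySem.Int.floordiv_natCast]
  rw [show ((run.length / kn : Nat) : Int) * ((kn : Nat) : Int)
      = ((run.length / kn * kn : Nat) : Int) by push_cast; ring]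
  rw [PySem.List.slice_to_natCast]
  simp

-- ==== B's fold computes the canonical per-run form ====
lemma foldB_eq (k : Int) (hk : 1 ≤ k) :
    ∀ (l run out : List Int) (p : Int), run.getLast? = some p →
    (l.foldl (pvStepB k) (out, run)).1 ++ pvEmitB (l.foldl (pvStepB k) (out, run)).2 k
    = out ++ (pvEmit k.toNat (run ++ (pvSplit p l).1) ++ pvCanon k.toNat (pvSplit p l).2) := by
  intro l
  induction l with
  | nil =>
    intro run out p hp
    simp [pvSplit, pvCanon, emitB_eq run k hk]
  | cons x xs ih =>
    intro run out p hp
    have hrun : run ≠ [] := by intro h; rw [h] at hp; simp at hp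
    have hget : (PySem.List.pyGet? run (-1)).map (· + 1) = some (p + 1) := by
      have : PySem.List.pyGet? run (-1) = run.getLast? := by simp [pysem]
      rw [this, hp, Option.map_some]
    rw [List.foldl_cons]
    by_cases hx : x = p + 1
    · have hstep : pvStepB k (out, run) x = (out, run ++ [x]) := by
        unfold pvStepB
        rw [if_neg (by
          intro hcontra
          exact hcontra.2 (by rw [hget, hx]))]
    
      rw [hstep]
      rw [ih (run ++ [x]) out x (by simp)]
      have hsp : pvSplit p (x :: xs) = (x :: (pvSplit x xs).1, (pvSplit x xs).2) := by
        rw [pvSplit, if_pos hx]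
      rw [hsp]
      simp [List.append_assoc]
    · have hstep : pvStepB k (out, run) x = (out ++ pvEmitB run k, [x]) := by
        unfold pvStepB
        rw [if_pos ⟨hrun, by rw [hget]; intro hcontra; exact hx (by injection hcontra; omega)⟩]
      rw [hstep]
      rw [ih [x] (out ++ pvEmitB run k) x (by simp)]
      have hsp : pvSplit p (x :: xs) = ([], x :: xs) := by
        rw [pvSplit, if_neg hx]
      rw [hsp]
      rw [emitB_eq run k hk]
      have hcanon : pvCanon k.toNat (x :: xs)
          = pvEmit k.toNat (x :: (pvSplit x xs).1) ++ pvCanon k.toNat (pvSplit x xs).2 := by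
        rw [pvCanon]
      rw [hcanon]
      simp [List.append_assoc]

-- ===== VERDICT (by name: the statement is the Claim_ definition above) =====
theorem find_consecutive_ch_blocks_of_size_spec : Claim_equal_find_consecutive_ch_blocks_of_size := by
  intro channels k _hdom hpre
  have hk : 1 ≤ k := hpre
  unfold Spec_find_consecutive_ch_blocks_of_size
  unfold find_consecutive_ch_blocks_of_size find_consecutive_ch_blocks_of_size_alt
  simp only []
  set s := PySem.List.sorted channels (fun x => x) false with hs
  have hA : pvLoopA s k (s.length + 1) 0 [] = pvCanon k.toNat s := by
    rw [loopA_eq s k hk (s.length + 1) 0 [] (by omega)]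
    rw [List.drop_zero, List.nil_append, pvG_eq_canon k.toNat (by omega) s]
  rw [hA]
  cases s with
  | nil =>
    simp [pvEmitB, pvCanon, PySem.List.slice]
  | cons x xs =>
    rw [List.foldl_cons]
    have hstep0 : pvStepB k (([] : List Int), ([] : List Int)) x = ([], [x]) := by
      unfold pvStepB
      rw [if_neg (by intro hcontra; exact hcontra.1 rfl)]
      rfl
    rw [hstep0]
    rw [foldB_eq k hk xs [x] [] x (by simp)]
    have hcanon : pvCanon k.toNat (x :: xs)
        = pvEmit k.toNat (x :: (pvSplit x xs).1) ++ pvCanon k.toNat (pvSplit x xs).2 := by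
      rw [pvCanon]
    rw [hcanon]
    simp
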